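-- pv_equiv track=rewrite | github.com/macintoshUserchg/jcodemunch-mcp | src/jcodemunch_mcp/tools/get_blast_radius.py | _bfs_importers
-- ===== SOURCE A (Python) =====
-- from collections import deque
--
-- def _bfs_importers(
--     start: str, rev: dict[str, list[str]], depth: int
-- ) -> tuple[list[str], dict[int, list[str]]]:
--     """BFS over reverse graph; return (flat list, depth-bucketed dict) excluding start."""
--     visited: set[str] = {start}
--     queue: deque = deque([(start, 0)])
--     result: list[str] = []
--     by_depth: dict[int, list[str]] = {}
--     while queue:
--         node, level = queue.popleft()
--         if level >= depth:
--             continue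
--         for importer in rev.get(node, []):
--             if importer not in visited:
--                 visited.add(importer)
--                 d = level + 1
--                 result.append(importer)
--                 by_depth.setdefault(d, []).append(importer)
--                 queue.append((importer, d))
--     return result, by_depth
-- ===== SOURCE B (Python) =====
-- def _bfs_importers(
--     start: str, rev: dict[str, list[str]], depth: int
-- ) -> tuple[list[str], dict[int, list[str]]]:
--     """Level-synchronized BFS over the reverse graph; no deque, no per-node level tags."""
--     visited: set[str] = {start}
--     result: list[str] = []
--     by_depth: dict[int, list[str]] = {}
--     frontier: list[str] = [start]
--     d = 1
--     while d <= depth and frontier: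
--         next_frontier: list[str] = []
--         for node in frontier:
--             for importer in rev.get(node, []):
--                 if importer not in visited:
--                     visited.add(importer)
--                     result.append(importer)
--                     next_frontier.append(importer)
--         if not next_frontier:
--             break
--         by_depth[d] = next_frontier
--         frontier = next_frontier
--         d += 1
--     return result, by_depth
-- ===== Notes on version B (the rewrite author's own statement) =====
-- stated objective: alternative
-- what changed: Replaces the deque of (node, level) pairs with a level-synchronized BFS: a plain frontier list per level, a range-style depth counter, and by_depth[d] assigned once per level from the whole next frontier instead of setdefault-append per node.
import Mathlib
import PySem

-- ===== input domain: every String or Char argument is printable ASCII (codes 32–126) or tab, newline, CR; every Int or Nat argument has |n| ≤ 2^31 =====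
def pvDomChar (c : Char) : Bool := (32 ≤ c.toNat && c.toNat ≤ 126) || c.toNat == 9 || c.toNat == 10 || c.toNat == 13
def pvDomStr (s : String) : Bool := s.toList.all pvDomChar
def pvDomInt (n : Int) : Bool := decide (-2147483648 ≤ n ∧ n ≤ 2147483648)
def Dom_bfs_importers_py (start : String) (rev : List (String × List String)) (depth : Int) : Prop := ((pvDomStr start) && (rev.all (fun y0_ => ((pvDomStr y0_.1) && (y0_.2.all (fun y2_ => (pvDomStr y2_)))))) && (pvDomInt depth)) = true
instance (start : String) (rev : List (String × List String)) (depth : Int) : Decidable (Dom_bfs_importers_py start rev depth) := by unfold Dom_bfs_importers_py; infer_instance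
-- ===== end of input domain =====

-- B replaces A's deque of (node, level) pairs by a level-synchronized frontier loop (objective: alternative decomposition, same asymptotic cost).
-- Both ports model Python's dicts as association lists (rev.get = first match).

-- rev.get(node, []) — first-match association-list lookup (used by both Pythons)
def getRev (rev : List (String × List String)) (node : String) : List String :=
  match rev.find? (fun p => p.1 == node) with
  | some p => p.2
  | none => []

-- ===== PORT A =====
-- by_depth.setdefault(d, []).append(x) on the association list
def bdAppend : List (Int × List String) → Int → String → List (Int × List String)
  | [], d, x => [(d, [x])]
  | (k, w) :: rest, d, x =>
      if k == d then (k, w ++ [x]) :: rest else (k, w) :: bdAppend rest d x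

-- one 'for importer in rev.get(node, [])' body; state = (visited, queue, result, by_depth)
def stepA (l : Int)
    (s : PySem.Set String × List (String × Int) × List String × List (Int × List String))
    (imp : String) :
    PySem.Set String × List (String × Int) × List String × List (Int × List String) :=
  if PySem.Set.contains s.1 imp then s
  else (PySem.Set.add s.1 imp, s.2.1 ++ [(imp, l + 1)], s.2.2.1 ++ [imp],
        bdAppend s.2.2.2 (l + 1) imp)

-- the 'while queue' loop; fuel bounds the number of pops (each pop is a distinct visited node)
def loopA (rev : List (String × List String)) (depth : Int) :
    Nat → PySem.Set String → List (String × Int) → List String → List (Int × List String) →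
    List String × List (Int × List String)
  | 0, _, _, r, b => (r, b)
  | _ + 1, _, [], r, b => (r, b)
  | f + 1, v, (node, level) :: qs, r, b =>
      if level ≥ depth then loopA rev depth f v qs r b
      else
        let s := (getRev rev node).foldl (stepA level) (v, qs, r, b)
        loopA rev depth f s.1 s.2.1 s.2.2.1 s.2.2.2

def bfs_importers_py (start : String) (rev : List (String × List String)) (depth : Int) :
    List String × (List (Int × List String)) :=
  loopA rev depth (1 + (rev.flatMap Prod.snd).length)
    (PySem.Set.ofList [start]) [(start, 0)] [] []

-- ===== PORT B =====
-- one 'for importer in rev.get(node, [])' body; state = (visited, result, next_frontier)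
def stepB (s : PySem.Set String × List String × List String) (imp : String) :
    PySem.Set String × List String × List String :=
  if PySem.Set.contains s.1 imp then s
  else (PySem.Set.add s.1 imp, s.2.1 ++ [imp], s.2.2 ++ [imp])

-- the 'for node in frontier' scan
def scanB (rev : List (String × List String)) (fr : List String)
    (s : PySem.Set String × List String × List String) :
    PySem.Set String × List String × List String :=
  fr.foldl (fun s node => (getRev rev node).foldl stepB s) s

-- by_depth[d] = v on the association list
def bdSet : List (Int × List String) → Int → List String → List (Int × List String)
  | [], d, v => [(d, v)]
  | (k, w) :: rest, d, v =>
      if k == d then (k, v) :: rest else (k, w) :: bdSet rest d v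

-- the 'while d <= depth and frontier' loop
def loopB (rev : List (String × List String)) (depth : Int) (d : Int)
    (v : PySem.Set String) (fr : List String) (r : List String)
    (b : List (Int × List String)) : List String × List (Int × List String) :=
  if h : d ≤ depth ∧ fr ≠ [] then
    let s := scanB rev fr (v, r, [])
    if s.2.2 = [] then (s.2.1, b)
    else loopB rev depth (d + 1) s.1 s.2.2 s.2.1 (bdSet b d s.2.2)
  else (r, b)
termination_by (depth + 1 - d).toNat
decreasing_by omega

def bfs_importers_py_alt (start : String) (rev : List (String × List String)) (depth : Int) :
    List String × (List (Int × List String)) :=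
  loopB rev depth 1 (PySem.Set.ofList [start]) [start] [] []

-- ===== PRECONDITION & SPEC =====
def Spec_bfs_importers_py (start : String) (rev : List (String × List String)) (depth : Int) (out : List String × (List (Int × List String))) : Prop := out = bfs_importers_py_alt start rev depth
instance (start : String) (rev : List (String × List String)) (depth : Int) (out : List String × (List (Int × List String))) : Decidable (Spec_bfs_importers_py start rev depth out) := by unfold Spec_bfs_importers_py; infer_instance

-- ===== CLAIM (what is proved, stated in full; the proofs are below) =====
def Claim_equal_bfs_importers_py : Prop := ∀ (start : String) (rev : List (String × List String)) (depth : Int), Dom_bfs_importers_py start rev depth → Spec_bfs_importers_py start rev depth (bfs_importers_py start rev depth)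

-- ===== LEMMAS AND PROOFS =====

-- number of importers of rev not yet visited (termination budget)
def Ucnt (rev : List (String × List String)) (v : List String) : Nat :=
  ((PySem.List.dedup (rev.flatMap Prod.snd)).filter (fun x => decide (x ∉ v))).length

-- repeated bdAppend at one key
def bdApps (b : List (Int × List String)) (d : Int) (xs : List String) :
    List (Int × List String) :=
  xs.foldl (fun b x => bdAppend b d x) b

theorem loopA_nil (rev : List (String × List String)) (depth : Int) (fuel : Nat)
    (v : PySem.Set String) (r : List String) (b : List (Int × List String)) :
    loopA rev depth fuel v [] r b = (r, b) := by
  cases fuel <;> rfl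

theorem loopA_drain (rev : List (String × List String)) (depth l : Int) (hl : depth ≤ l) :
    ∀ (fr : List String) (fuel : Nat) (v : PySem.Set String) (r : List String)
      (b : List (Int × List String)),
      loopA rev depth fuel v (fr.map (fun n => (n, l))) r b = (r, b) := by
  intro fr
  induction fr with
  | nil => intro fuel v r b; simpa using loopA_nil rev depth fuel v r b
  | cons n fr ih =>
      intro fuel v r b
      cases fuel with
      | zero => rfl
      | succ f => simp [loopA, hl, ih]

theorem fold_step_eq (_rev : List (String × List String)) (l : Int) :
    ∀ (imps : List String) (v : PySem.Set String) (Q : List (String × Int))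
      (r : List String) (b : List (Int × List String)) (nf : List String),
      imps.foldl (stepA l) (v, Q ++ nf.map (fun n => (n, l + 1)), r, bdApps b (l + 1) nf)
        = ((imps.foldl stepB (v, r, nf)).1,
           Q ++ (imps.foldl stepB (v, r, nf)).2.2.map (fun n => (n, l + 1)),
           (imps.foldl stepB (v, r, nf)).2.1,
           bdApps b (l + 1) (imps.foldl stepB (v, r, nf)).2.2) := by
  intro imps
  induction imps with
  | nil => intro v Q r b nf; rfl
  | cons imp imps ih =>
      intro v Q r b nf
      by_cases h : PySem.Set.contains v imp
      · simp only [List.foldl_cons, stepA, stepB, h, if_pos]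
        exact ih v Q r b nf
      · simp only [List.foldl_cons, stepA, stepB, h, if_neg, Bool.false_eq_true,
          not_false_iff]
        have hq : (Q ++ nf.map (fun n => (n, l + 1))) ++ [(imp, l + 1)]
            = Q ++ (nf ++ [imp]).map (fun n => (n, l + 1)) := by
          simp [List.map_append]
        have hb : bdAppend (bdApps b (l + 1) nf) (l + 1) imp
            = bdApps b (l + 1) (nf ++ [imp]) := by
          simp [bdApps, List.foldl_append]
        simp only [hq, hb]
        exact ih (PySem.Set.add v imp) Q (r ++ [imp]) b (nf ++ [imp])

theorem consume (rev : List (String × List String)) (depth l : Int) (hl : l < depth) :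
    ∀ (fr : List String) (fuel : Nat) (v : PySem.Set String) (r : List String)
      (b : List (Int × List String)) (nf : List String),
      fr.length ≤ fuel →
      loopA rev depth fuel v
        (fr.map (fun n => (n, l)) ++ nf.map (fun n => (n, l + 1))) r (bdApps b (l + 1) nf)
      = loopA rev depth (fuel - fr.length)
          (scanB rev fr (v, r, nf)).1
          ((scanB rev fr (v, r, nf)).2.2.map (fun n => (n, l + 1)))
          (scanB rev fr (v, r, nf)).2.1
          (bdApps b (l + 1) (scanB rev fr (v, r, nf)).2.2) := by
  intro fr
  induction fr with
  | nil => intro fuel v r b nf _; simp [scanB]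
  | cons node fr ih =>
      intro fuel v r b nf hlen
      cases fuel with
      | zero => simp at hlen
      | succ f =>
          have hnl : ¬ (l ≥ depth) := by omega
          simp only [List.map_cons, List.cons_append, loopA, hnl, if_neg,
            not_false_iff]
          have := fold_step_eq rev l (getRev rev node) v (fr.map (fun n => (n, l))) r b nf
          simp only [this]
          have hscan : scanB rev (node :: fr) (v, r, nf)
              = scanB rev fr ((getRev rev node).foldl stepB (v, r, nf)) := by
            simp [scanB]
          rw [hscan]
          have hs : Nat.succ f - (node :: fr).length = f - fr.length := by
            simp [Nat.succ_sub_succ]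
          rw [hs]
          obtain ⟨v', r', nf'⟩ := (getRev rev node).foldl stepB (v, r, nf)
          exact ih f v' r' b nf' (by simpa using Nat.lt_succ_iff.mp (by simpa using hlen))

theorem foldB_delta :
    ∀ (imps : List String) (v : PySem.Set String) (r nf : List String),
      v.Nodup →
      ∃ δ, imps.foldl stepB (v, r, nf) = (v ++ δ, r ++ δ, nf ++ δ)
        ∧ (∀ x ∈ δ, x ∈ imps) ∧ (v ++ δ).Nodup := by
  intro imps
  induction imps with
  | nil => intro v r nf hv; exact ⟨[], by simp, by simp, by simpa using hv⟩
  | cons imp imps ih =>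
      intro v r nf hv
      rw [List.foldl_cons]
      by_cases h : PySem.Set.contains v imp
      · have hm : imp ∈ v := (PySem.Set.contains_iff v imp).mp h
        have hstep : stepB (v, r, nf) imp = (v, r, nf) := by simp [stepB, hm]
        rw [hstep]
        obtain ⟨δ, h1, h2, h3⟩ := ih v r nf hv
        exact ⟨δ, h1, fun x hx => List.mem_cons_of_mem _ (h2 x hx), h3⟩
      · have hmem : imp ∉ v := by
          intro hc; exact h ((PySem.Set.contains_iff v imp).mpr hc)
        have hadd : PySem.Set.add v imp = v ++ [imp] := PySem.Set.add_of_not_mem hmem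
        have hstep : stepB (v, r, nf) imp
            = (v ++ [imp], r ++ [imp], nf ++ [imp]) := by
          simp [stepB, hmem]
        rw [hstep]
        have hnd : (v ++ [imp]).Nodup := by
          rw [List.nodup_append]
          refine ⟨hv, List.nodup_singleton _, ?_⟩
          intro a ha b hb
          simp only [List.mem_singleton] at hb
          subst hb
          exact fun he => hmem (he ▸ ha)
        obtain ⟨δ, h1, h2, h3⟩ := ih (v ++ [imp]) (r ++ [imp]) (nf ++ [imp]) hnd
        refine ⟨imp :: δ, ?_, ?_, ?_⟩
        · rw [h1]
          simp only [List.append_assoc, List.singleton_append]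
        · intro x hx
          rcases List.mem_cons.mp hx with hx | hx
          · simp [hx]
          · exact List.mem_cons_of_mem _ (h2 x hx)
        · have he : v ++ imp :: δ = (v ++ [imp]) ++ δ := by
            simp only [List.append_assoc, List.singleton_append]
          rw [he]; exact h3

theorem getRev_sub (rev : List (String × List String)) (node : String) :
    ∀ x ∈ getRev rev node, x ∈ rev.flatMap Prod.snd := by
  intro x hx
  unfold getRev at hx
  cases hfind : rev.find? (fun p => p.1 == node) with
  | none => rw [hfind] at hx; simp at hx
  | some p =>
      rw [hfind] at hx
      exact List.mem_flatMap.mpr ⟨p, List.mem_of_find?_eq_some hfind, hx⟩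

theorem scanB_delta (rev : List (String × List String)) :
    ∀ (fr : List String) (v : PySem.Set String) (r nf : List String),
      v.Nodup →
      ∃ δ, scanB rev fr (v, r, nf) = (v ++ δ, r ++ δ, nf ++ δ)
        ∧ (∀ x ∈ δ, x ∈ rev.flatMap Prod.snd) ∧ (v ++ δ).Nodup := by
  intro fr
  induction fr with
  | nil => intro v r nf hv; exact ⟨[], by simp [scanB], by simp, by simpa using hv⟩
  | cons node fr ih =>
      intro v r nf hv
      obtain ⟨δ1, h1, h2, h3⟩ := foldB_delta (getRev rev node) v r nf hv
      obtain ⟨δ2, g1, g2, g3⟩ := ih (v ++ δ1) (r ++ δ1) (nf ++ δ1) h3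
      refine ⟨δ1 ++ δ2, ?_, ?_, ?_⟩
      · have : scanB rev (node :: fr) (v, r, nf)
            = scanB rev fr ((getRev rev node).foldl stepB (v, r, nf)) := by simp [scanB]
        rw [this, h1, g1]; simp
      · intro x hx
        rcases List.mem_append.mp hx with hx | hx
        · exact getRev_sub rev node x (h2 x hx)
        · exact g2 x hx
      · simpa [List.append_assoc] using g3

theorem filter_remove (d : String) :
    ∀ (D : List String) (v : List String), D.Nodup → d ∈ D → d ∉ v →
      (D.filter (fun x => decide (x ∉ v ++ [d]))).length + 1
        = (D.filter (fun x => decide (x ∉ v))).length := by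
  intro D
  induction D with
  | nil => intro v _ hd _; simp at hd
  | cons a D ih =>
      intro v hnd hd hdv
      have hnda : a ∉ D := (List.nodup_cons.mp hnd).1
      have hndD : D.Nodup := (List.nodup_cons.mp hnd).2
      rw [List.filter_cons, List.filter_cons]
      by_cases hda : d = a
      · subst hda
        have hcongr : List.filter (fun x => decide (x ∉ v ++ [d])) D
            = List.filter (fun x => decide (x ∉ v)) D := by
          apply List.filter_congr
          intro x hx
          have hxd : x ≠ d := fun h => hnda (h ▸ hx)
          simp [List.mem_append, hxd]
        rw [if_neg (by simp), if_pos (by simp [hdv]), hcongr]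
        simp
      · have hdD : d ∈ D := by
          rcases List.mem_cons.mp hd with h | h
          · exact absurd h hda
          · exact h
        by_cases hav : a ∈ v
        · rw [if_neg (by simp [hav]), if_neg (by simp [hav])]
          exact ih v hndD hdD hdv
        · rw [if_pos (by simp [hav, Ne.symm hda]), if_pos (by simp [hav])]
          have := ih v hndD hdD hdv
          simp only [List.length_cons]
          omega

theorem U_split (D : List String) (hD : D.Nodup) :
    ∀ (δ : List String) (v : List String), δ.Nodup →
      (∀ x ∈ δ, x ∈ D ∧ x ∉ v) →
      (D.filter (fun x => decide (x ∉ v ++ δ))).length + δ.length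
        = (D.filter (fun x => decide (x ∉ v))).length := by
  intro δ
  induction δ with
  | nil => intro v _ _; simp
  | cons d δ ih =>
      intro v hnd hmem
      have hdD : d ∈ D := (hmem d (List.mem_cons_self)).1
      have hdv : d ∉ v := (hmem d (List.mem_cons_self)).2
      have hstep : v ++ d :: δ = (v ++ [d]) ++ δ := by simp
      rw [hstep]
      have ihh := ih (v ++ [d]) (List.nodup_cons.mp hnd).2 ?_
      · have := filter_remove d D v hD hdD hdv
        simp only [List.length_cons]
        omega
      · intro x hx
        refine ⟨(hmem x (List.mem_cons_of_mem _ hx)).1, ?_⟩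
        have hxv : x ∉ v := (hmem x (List.mem_cons_of_mem _ hx)).2
        have hxd : x ≠ d := by
          intro h; exact (List.nodup_cons.mp hnd).1 (h ▸ hx)
        simp [hxv, hxd]

theorem bdAppend_last (d : Int) (x : String) (cur : List String) :
    ∀ (b0 : List (Int × List String)), d ∉ b0.map Prod.fst →
      bdAppend (b0 ++ [(d, cur)]) d x = b0 ++ [(d, cur ++ [x])] := by
  intro b0
  induction b0 with
  | nil => intro _; simp [bdAppend]
  | cons p b0 ih =>
      intro hfresh
      obtain ⟨k, w⟩ := p
      have hk : k ≠ d := by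
        intro h; exact hfresh (by simp [h])
      have hk' : (k == d) = false := by simp [hk]
      simp only [List.cons_append, bdAppend, hk', Bool.false_eq_true, if_neg,
        not_false_iff]
      rw [ih (fun h => hfresh (by simp [h]))]

theorem bdApps_last (d : Int) :
    ∀ (xs : List String) (cur : List String) (b0 : List (Int × List String)),
      d ∉ b0.map Prod.fst →
      bdApps (b0 ++ [(d, cur)]) d xs = b0 ++ [(d, cur ++ xs)] := by
  intro xs
  induction xs with
  | nil => intro cur b0 _; simp [bdApps]
  | cons x xs ih =>
      intro cur b0 hfresh
      have h1 : bdApps (b0 ++ [(d, cur)]) d (x :: xs)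
          = bdApps (bdAppend (b0 ++ [(d, cur)]) d x) d xs := by simp [bdApps]
      rw [h1, bdAppend_last d x cur b0 hfresh, ih (cur ++ [x]) b0 hfresh]
      simp

theorem bdAppend_fresh (d : Int) (x : String) :
    ∀ (b : List (Int × List String)), d ∉ b.map Prod.fst →
      bdAppend b d x = b ++ [(d, [x])] := by
  intro b
  induction b with
  | nil => intro _; simp [bdAppend]
  | cons p b ih =>
      intro hfresh
      obtain ⟨k, w⟩ := p
      have hk : k ≠ d := fun h => hfresh (by simp [h])
      have hk' : (k == d) = false := by simp [hk]
      simp only [bdAppend, hk', Bool.false_eq_true, if_neg, not_false_iff,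
        List.cons_append]
      rw [ih (fun h => hfresh (by simp [h]))]

theorem bdApps_fresh (d : Int) (xs : List String) (b : List (Int × List String))
    (hfresh : d ∉ b.map Prod.fst) :
    bdApps b d xs = if xs = [] then b else b ++ [(d, xs)] := by
  cases xs with
  | nil => simp [bdApps]
  | cons x xs =>
      have h1 : bdApps b d (x :: xs) = bdApps (bdAppend b d x) d xs := by simp [bdApps]
      rw [h1, bdAppend_fresh d x b hfresh, bdApps_last d xs [x] b hfresh]
      simp

theorem bdSet_fresh (d : Int) (v : List String) :
    ∀ (b : List (Int × List String)), d ∉ b.map Prod.fst →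
      bdSet b d v = b ++ [(d, v)] := by
  intro b
  induction b with
  | nil => intro _; simp [bdSet]
  | cons p b ih =>
      intro hfresh
      obtain ⟨k, w⟩ := p
      have hk : k ≠ d := fun h => hfresh (by simp [h])
      have hk' : (k == d) = false := by simp [hk]
      simp only [bdSet, hk', Bool.false_eq_true, if_neg, not_false_iff, List.cons_append]
      rw [ih (fun h => hfresh (by simp [h]))]

theorem main_loop (rev : List (String × List String)) (depth : Int) :
    ∀ (fuel : Nat) (l : Int) (fr : List String) (v : PySem.Set String)
      (r : List String) (b : List (Int × List String)),
      v.Nodup →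
      fr.length + Ucnt rev v ≤ fuel →
      (∀ k ∈ b.map Prod.fst, k ≤ l) →
      loopA rev depth fuel v (fr.map (fun n => (n, l))) r b
        = loopB rev depth (l + 1) v fr r b := by
  intro fuel
  induction fuel using Nat.strong_induction_on with
  | _ fuel IH =>
      intro l fr v r b hv hfuel hkeys
      by_cases hd : l + 1 ≤ depth
      · by_cases hfr : fr = []
        · subst hfr
          rw [loopB]
          simp [loopA_nil]
        · have hl : l < depth := by omega
          have hlen : fr.length ≤ fuel := le_trans (Nat.le_add_right _ _) hfuel
          have hcons := consume rev depth l hl fr fuel v r b [] hlen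
          simp only [List.map_nil, List.append_nil] at hcons
          have hb0 : bdApps b (l + 1) [] = b := by simp [bdApps]
          rw [hb0] at hcons
          obtain ⟨δ, hs, hmem, hnd⟩ := scanB_delta rev fr v r [] hv
          simp only [List.nil_append] at hs
          have hfreshb : (l + 1) ∉ b.map Prod.fst := by
            intro h; have := hkeys _ h; omega
          rw [hcons, hs]
          rw [loopB]
          simp only [hd, hfr, ne_eq, not_false_iff, and_self, dif_pos, hs]
          by_cases hδ : δ = []
          · subst hδ
            simp only [List.append_nil, bdApps]
            simp [loopA_nil]
          · have hnodup := hnd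
            have hsplit := List.nodup_append.mp hnodup
            have hδnd : δ.Nodup := hsplit.2.1
            have hdisj : ∀ x ∈ δ, x ∉ v := by
              intro x hx hxv
              exact hsplit.2.2 x hxv x hx rfl
            have hUc : Ucnt rev (v ++ δ) + δ.length = Ucnt rev v := by
              unfold Ucnt
              exact U_split _ (PySem.List.nodup_dedup _) δ v hδnd
                (fun x hx => ⟨(PySem.List.mem_dedup _ _).mpr (hmem x hx), hdisj x hx⟩)
            have hfr1 : 1 ≤ fr.length := by
              cases fr with
              | nil => exact absurd rfl hfr
              | cons _ _ => simp
            have hlt : fuel - fr.length < fuel := by omega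
            have hbd : bdApps b (l + 1) δ = b ++ [(l + 1, δ)] := by
              rw [bdApps_fresh _ _ _ hfreshb]; simp [hδ]
            have hbs : bdSet b (l + 1) δ = b ++ [(l + 1, δ)] :=
              bdSet_fresh _ _ _ hfreshb
            rw [hbd]
            have hkeys' : ∀ k ∈ (b ++ [(l + 1, δ)]).map Prod.fst, k ≤ l + 1 := by
              intro k hk
              simp only [List.map_append, List.mem_append] at hk
              rcases hk with hk | hk
              · have := hkeys _ hk; omega
              · simp at hk; omega
            have hfuel' : δ.length + Ucnt rev (v ++ δ) ≤ fuel - fr.length := by omega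
            have := IH (fuel - fr.length) hlt (l + 1) δ (v ++ δ) (r ++ δ)
              (b ++ [(l + 1, δ)]) hnd hfuel' hkeys'
            rw [this, if_neg hδ, hbs]
      · have hl : depth ≤ l := by omega
        rw [loopA_drain rev depth l hl fr fuel v r b, loopB]
        simp [hd]

theorem bfs_importers_py_eq (start : String) (rev : List (String × List String))
    (depth : Int) : bfs_importers_py start rev depth = bfs_importers_py_alt start rev depth := by
  unfold bfs_importers_py bfs_importers_py_alt
  have hflat : Ucnt rev (PySem.Set.ofList [start]) ≤ (rev.flatMap Prod.snd).length := by
    unfold Ucnt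
    calc ((PySem.List.dedup (rev.flatMap Prod.snd)).filter _).length
        ≤ (PySem.List.dedup (rev.flatMap Prod.snd)).length := List.length_filter_le _ _
      _ ≤ (rev.flatMap Prod.snd).length := by
          rw [PySem.List.dedup_eq_ofList]; exact PySem.Set.length_ofList_le _
  have h := main_loop rev depth (1 + (rev.flatMap Prod.snd).length) 0 [start]
    (PySem.Set.ofList [start]) [] [] (PySem.Set.nodup_ofList _)
    (by simp only [List.length_cons, List.length_nil]; omega) (by simp)
  have hq : ([start].map (fun n => (n, (0 : Int)))) = [(start, (0 : Int))] := by simp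
  rw [hq] at h
  have h0 : (0 : Int) + 1 = 1 := by norm_num
  rw [h0] at h
  exact h

-- ===== VERDICT (by name: the statement is the Claim_ definition above) =====
theorem bfs_importers_py_spec : Claim_equal_bfs_importers_py := by
  intro start rev depth _
  unfold Spec_bfs_importers_py
  exact bfs_importers_py_eq start rev depth
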